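-- pv_equiv track=rewrite | github.com/armindoerzbachtbz/adventofcode | twelth.py | checkmodifiedpattern
-- ===== SOURCE A (Python) =====
-- def checkmodifiedpattern(numbers, modifiedpattern):
--     i = 0
--     numberindex = 0
--     while i < len(modifiedpattern):
--         if modifiedpattern[i] == '#':
--             if numberindex >= len(numbers):
--                 return False
--             n = numbers[numberindex]
--             start = i
--             while i < len(modifiedpattern) and modifiedpattern[i] == '#':
--                 i += 1
--             numberindex += 1
--             if n != i - start:
--                 return False
--         else:
--             i += 1
--     if numberindex < len(numbers):
--         return False
--     return True
-- ===== SOURCE B (Python) =====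
-- def checkmodifiedpattern(numbers, modifiedpattern):
--     # Pass 1: collect the lengths of all maximal runs of '#'.
--     lengths = []
--     run = 0
--     for c in modifiedpattern:
--         if c == '#':
--             run += 1
--         else:
--             if run:
--                 lengths.append(run)
--             run = 0
--     if run:
--         lengths.append(run)
--     # Pass 2: compare against the expected counts.
--     return lengths == list(numbers)
-- ===== Notes on version B (the rewrite author's own statement) =====
-- stated objective: simpler
-- what changed: B separates the work into two phases: a single character-by-character fold that builds the full list of '#'-run lengths, then one list equality test, instead of A's fused index/while verification loop with four early returns.
import Mathlib
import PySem

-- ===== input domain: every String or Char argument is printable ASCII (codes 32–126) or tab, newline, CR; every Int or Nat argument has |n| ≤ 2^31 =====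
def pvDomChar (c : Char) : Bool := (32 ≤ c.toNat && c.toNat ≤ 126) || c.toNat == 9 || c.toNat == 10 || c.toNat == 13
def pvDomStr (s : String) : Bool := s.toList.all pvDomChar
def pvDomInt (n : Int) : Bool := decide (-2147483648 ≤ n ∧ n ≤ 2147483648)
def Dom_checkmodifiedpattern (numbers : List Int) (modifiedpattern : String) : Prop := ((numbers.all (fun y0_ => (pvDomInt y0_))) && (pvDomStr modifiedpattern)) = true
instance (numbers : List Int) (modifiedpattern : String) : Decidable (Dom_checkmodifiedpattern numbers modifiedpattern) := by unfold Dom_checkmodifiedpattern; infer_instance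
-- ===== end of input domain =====

-- B differs from A by decomposition only (two phases instead of one fused loop); same O(n) cost.

-- ===== PORT A =====
-- Outer while loop of A as structural recursion over the remaining characters;
-- the inner `while … == '#'` that advances i is `takeWhile`, and `i - start`
-- is 1 + length of the '#'-run following the current character.
def checkmodifiedpatternGo (ns : List Int) (cs : List Char) : Bool :=
  match cs with
  | [] => ns.isEmpty            -- "if numberindex < len(numbers): return False / return True"
  | c :: rest =>
    if c = '#' then
      match ns with
      | [] => false             -- "if numberindex >= len(numbers): return False"
      | n :: ns' =>
        let run : Int := 1 + (rest.takeWhile (fun d => d = '#')).length   -- i - start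
        if n ≠ run then false   -- "if n != i - start: return False"
        else checkmodifiedpatternGo ns' (rest.dropWhile (fun d => d = '#'))
    else checkmodifiedpatternGo ns rest
termination_by cs.length
decreasing_by
  · exact Nat.lt_succ_of_le (List.length_dropWhile_le _ _)
  · simp

def checkmodifiedpattern (numbers : List Int) (modifiedpattern : String) : Bool :=
  checkmodifiedpatternGo numbers modifiedpattern.toList

-- ===== PORT B =====
-- Phase 1 of Source B: the for-loop over the characters, carrying (lengths, run).
def altStep (st : List Nat × Nat) (c : Char) : List Nat × Nat :=
  if c = '#' then (st.1, st.2 + 1)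
  else (if st.2 ≠ 0 then st.1 ++ [st.2] else st.1, 0)

def checkmodifiedpattern_alt (numbers : List Int) (modifiedpattern : String) : Bool :=
  let st := modifiedpattern.toList.foldl altStep ([], 0)
  let lengths := if st.2 ≠ 0 then st.1 ++ [st.2] else st.1
  -- Phase 2 of Source B: lengths == list(numbers)
  decide (lengths.map (Int.ofNat) = numbers)

-- ===== PRECONDITION & SPEC =====
def Spec_checkmodifiedpattern (numbers : List Int) (modifiedpattern : String) (out : Bool) : Prop := out = checkmodifiedpattern_alt numbers modifiedpattern
instance (numbers : List Int) (modifiedpattern : String) (out : Bool) : Decidable (Spec_checkmodifiedpattern numbers modifiedpattern out) := by unfold Spec_checkmodifiedpattern; infer_instance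

-- ===== CLAIM (what is proved, stated in full; the proofs are below) =====
def Claim_equal_checkmodifiedpattern : Prop := ∀ (numbers : List Int) (modifiedpattern : String), Dom_checkmodifiedpattern numbers modifiedpattern → Spec_checkmodifiedpattern numbers modifiedpattern (checkmodifiedpattern numbers modifiedpattern)

-- ===== LEMMAS AND PROOFS =====

-- Reference run-length list: `aux r cs` = run lengths of cs given an open run of length r.
def auxRuns (r : Nat) (cs : List Char) : List Nat :=
  match cs with
  | [] => if r = 0 then [] else [r]
  | c :: rest =>
    if c = '#' then auxRuns (r + 1) rest
    else (if r = 0 then [] else [r]) ++ auxRuns 0 rest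

lemma auxRuns_pos (cs : List Char) : ∀ r : Nat, 0 < r →
    auxRuns r cs = (r + (cs.takeWhile (fun d => d = '#')).length)
      :: auxRuns 0 (cs.dropWhile (fun d => d = '#')) := by
  induction cs with
  | nil =>
    intro r hr
    have hr' : r ≠ 0 := by omega
    simp [auxRuns, hr']
  | cons c rest ih =>
    intro r hr
    have hr' : r ≠ 0 := by omega
    by_cases hc : c = '#'
    · simp only [auxRuns, List.takeWhile, List.dropWhile, hc, decide_true]
      rw [ih (r+1) (by omega)]
      simp; omega
    · simp [auxRuns, hc, hr']

lemma foldl_altStep (cs : List Char) : ∀ (acc : List Nat) (r : Nat),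
    (if (cs.foldl altStep (acc, r)).2 ≠ 0
      then (cs.foldl altStep (acc, r)).1 ++ [(cs.foldl altStep (acc, r)).2]
      else (cs.foldl altStep (acc, r)).1) = acc ++ auxRuns r cs := by
  induction cs with
  | nil =>
    intro acc r
    by_cases hr : r = 0 <;> simp [auxRuns, hr]
  | cons c rest ih =>
    intro acc r
    rw [List.foldl_cons]
    by_cases hc : c = '#'
    · rw [show altStep (acc, r) c = (acc, r + 1) from by simp [altStep, hc]]
      rw [ih acc (r + 1)]
      simp [auxRuns, hc]
    · by_cases hr : r = 0
      · rw [show altStep (acc, r) c = (acc, 0) from by simp [altStep, hc, hr]]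
        rw [ih acc 0]
        simp [auxRuns, hc, hr]
      · rw [show altStep (acc, r) c = (acc ++ [r], 0) from by simp [altStep, hc, hr]]
        rw [ih (acc ++ [r]) 0]
        simp [auxRuns, hc, hr]

lemma go_nil (ns : List Int) : checkmodifiedpatternGo ns [] = ns.isEmpty := by
  rw [checkmodifiedpatternGo.eq_def]

lemma go_hash_nil (rest : List Char) : checkmodifiedpatternGo [] ('#' :: rest) = false := by
  rw [checkmodifiedpatternGo.eq_def]
  rfl

lemma go_hash_cons (n : Int) (ns' : List Int) (rest : List Char) :
    checkmodifiedpatternGo (n :: ns') ('#' :: rest)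
      = (if n ≠ 1 + ((rest.takeWhile (fun d => d = '#')).length : Int) then false
         else checkmodifiedpatternGo ns' (rest.dropWhile (fun d => d = '#'))) := by
  rw [checkmodifiedpatternGo.eq_def]
  rfl

lemma go_other (ns : List Int) (c : Char) (rest : List Char) (hc : ¬ c = '#') :
    checkmodifiedpatternGo ns (c :: rest) = checkmodifiedpatternGo ns rest := by
  rw [checkmodifiedpatternGo.eq_def]
  simp [hc]

lemma go_eq_auxRuns (cs : List Char) (ns : List Int) :
    checkmodifiedpatternGo ns cs = decide ((auxRuns 0 cs).map Int.ofNat = ns) := by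
  induction hn : cs.length using Nat.strong_induction_on generalizing cs ns with
  | _ m ih =>
    subst hn
    match cs with
    | [] =>
      cases ns <;> simp [go_nil, auxRuns]
    | c :: rest =>
      by_cases hc : c = '#'
      · subst hc
        have hrun := auxRuns_pos rest 1 (by omega)
        rw [show auxRuns 0 ('#' :: rest) = auxRuns 1 rest from by simp [auxRuns], hrun]
        match ns with
        | [] =>
          simp [go_hash_nil]
        | n :: ns' =>
          have hlen : (rest.dropWhile (fun d => d = '#')).length < ('#' :: rest).length :=
            Nat.lt_succ_of_le (List.length_dropWhile_le _ _)
          rw [go_hash_cons]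
          by_cases hn : n = (1 + (rest.takeWhile (fun d => d = '#')).length : Int)
          · rw [if_neg (not_ne_iff.mpr hn)]
            rw [ih _ hlen _ ns' rfl]
            simp only [List.map_cons, decide_eq_decide]
            have hcast : (Int.ofNat (1 + (rest.takeWhile (fun d => d = '#')).length)) = n := by
              rw [Int.ofNat_eq_natCast, hn]; push_cast; ring
            rw [hcast]
            simp
          · rw [if_pos hn]
            refine (decide_eq_false ?_).symm
            intro h
            have h1 := (List.cons_eq_cons.mp h).1
            rw [Int.ofNat_eq_natCast] at h1
            exact hn (by omega)
      · rw [go_other ns c rest hc]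
        rw [ih _ (by simp) rest ns rfl]
        simp [auxRuns, hc]

-- ===== VERDICT (by name: the statement is the Claim_ definition above) =====
theorem checkmodifiedpattern_spec : Claim_equal_checkmodifiedpattern := by
  intro numbers modifiedpattern _
  unfold Spec_checkmodifiedpattern checkmodifiedpattern checkmodifiedpattern_alt
  simp only []
  rw [go_eq_auxRuns, foldl_altStep modifiedpattern.toList [] 0]
  simp
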